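-- pv_equiv track=rewrite | github.com/hanwgyu/CTCI_solution | Leetcode/1954.py | minimumPerimeter_2
-- ===== SOURCE A (Python) =====
-- def minimumPerimeter_2(neededApples: int) -> int:
--     l, r = 0, 100000
--     while l <= r:
--         m = (l+r)//2
--         apples = (2 * m + 1) * m * (m + 1) * 2
--         if apples >= neededApples:
--             r = m - 1
--         else:
--             l = m + 1
--     return 8 * l
-- ===== SOURCE B (Python) =====
-- def minimumPerimeter_2(neededApples: int) -> int:
--     m = 0
--     while 2 * m * (m + 1) * (2 * m + 1) < neededApples:
--         m += 1
--     return 8 * m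
-- ===== Notes on version B (the rewrite author's own statement) =====
-- stated objective: simpler
-- what changed: Replaces the binary search over [0,100000] with a direct linear scan upward from the smallest half-width, returning at the first one whose apple count reaches neededApples, relying on monotonicity of the count.
import Mathlib
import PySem

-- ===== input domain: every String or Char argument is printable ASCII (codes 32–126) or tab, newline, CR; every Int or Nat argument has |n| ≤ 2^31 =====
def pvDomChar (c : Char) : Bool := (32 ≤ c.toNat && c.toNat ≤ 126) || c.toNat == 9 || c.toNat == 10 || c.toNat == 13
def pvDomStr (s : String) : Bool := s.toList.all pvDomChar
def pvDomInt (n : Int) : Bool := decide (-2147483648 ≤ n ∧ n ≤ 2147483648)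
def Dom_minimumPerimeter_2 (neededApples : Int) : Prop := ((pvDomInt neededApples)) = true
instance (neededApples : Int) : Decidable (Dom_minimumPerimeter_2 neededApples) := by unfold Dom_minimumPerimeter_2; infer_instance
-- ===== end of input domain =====

-- B replaces A's binary search by a linear scan upward for the first sufficient
-- apple count (simpler; same return value on the whole domain).

-- ===== PORT A =====
-- literal port of A's binary-search loop; state (l, r), measure r + 1 - l
def pvLoopA (neededApples l r : Int) : Int :=
  if _h : l ≤ r then
    let m := PySem.Int.floordiv (l + r) 2
    if (2 * m + 1) * m * (m + 1) * 2 ≥ neededApples then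
      pvLoopA neededApples l (m - 1)
    else
      pvLoopA neededApples (m + 1) r
  else
    l
termination_by (r + 1 - l).toNat
decreasing_by
  · have := PySem.Int.floordiv_two_mid_bounds (lo := l) (hi := r) _h
    omega
  · have := PySem.Int.floordiv_two_mid_bounds (lo := l) (hi := r) _h
    omega

def minimumPerimeter_2 (neededApples : Int) : Int :=
  8 * pvLoopA neededApples 0 100000

-- ===== PORT B =====
-- literal port of Source B's while loop: scan upward until the count suffices.
-- The counter is a Nat (it only increments); termination: once
-- (m : Int) ≥ neededApples the count 2*m*(m+1)*(2*m+1) ≥ m ≥ neededApples stops the loop.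
def pvLoopB (neededApples : Int) (m : Nat) : Int :=
  if 2 * (m : Int) * ((m : Int) + 1) * (2 * (m : Int) + 1) < neededApples then
    pvLoopB neededApples (m + 1)
  else
    8 * (m : Int)
termination_by (neededApples + 1 - m).toNat
decreasing_by
  rename_i h
  have hm0 : (0:Int) ≤ (m:Int) := Int.natCast_nonneg m
  have hm : (m : Int) < neededApples := by nlinarith [mul_nonneg hm0 hm0, mul_nonneg (mul_nonneg hm0 hm0) hm0]
  omega

def minimumPerimeter_2_alt (neededApples : Int) : Int :=
  pvLoopB neededApples 0

-- ===== PRECONDITION & SPEC =====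
def Spec_minimumPerimeter_2 (neededApples : Int) (out : Int) : Prop := out = minimumPerimeter_2_alt neededApples
instance (neededApples : Int) (out : Int) : Decidable (Spec_minimumPerimeter_2 neededApples out) := by unfold Spec_minimumPerimeter_2; infer_instance

-- ===== CLAIM (what is proved, stated in full; the proofs are below) =====
def Claim_equal_minimumPerimeter_2 : Prop := ∀ (neededApples : Int), Dom_minimumPerimeter_2 neededApples → Spec_minimumPerimeter_2 neededApples (minimumPerimeter_2 neededApples)

-- ===== LEMMAS AND PROOFS =====

-- the common predicate: the orchard of half-width k holds enough apples
def pvOK (neededApples k : Int) : Prop := neededApples ≤ (2 * k + 1) * k * (k + 1) * 2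

theorem pvOK_mono (neededApples a b : Int) (ha : 0 ≤ a) (hab : a ≤ b)
    (h : pvOK neededApples a) : pvOK neededApples b := by
  unfold pvOK at *
  have hb : 0 ≤ b := le_trans ha hab
  have hd : 0 ≤ b - a := by omega
  nlinarith [mul_nonneg ha hb, mul_nonneg hd hb, mul_nonneg hd ha, mul_nonneg (mul_nonneg hd hb) ha, mul_nonneg (mul_nonneg hd hb) hb, mul_nonneg (mul_nonneg hd ha) ha]

-- skipping over a block of failing indices does not change B's loop
theorem pvLoopB_skip (neededApples : Int) (a b : Nat) (hab : a ≤ b)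
    (hfail : ∀ k : Nat, a ≤ k → k < b → ¬ pvOK neededApples k) :
    pvLoopB neededApples a = pvLoopB neededApples b := by
  induction b with
  | zero => simp [Nat.le_zero.mp hab]
  | succ n ih =>
    rcases Nat.lt_or_ge a (n + 1) with hlt | hge
    · have han : a ≤ n := by omega
      have hn : ¬ pvOK neededApples n := hfail n han (by omega)
      have h1 : pvLoopB neededApples n = pvLoopB neededApples (n + 1) := by
        rw [pvLoopB]
        have : 2 * (n : Int) * ((n : Int) + 1) * (2 * (n : Int) + 1) < neededApples := by
          unfold pvOK at hn; nlinarith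
        simp [this]
      rw [← h1]
      exact ih han (fun k hk1 hk2 => hfail k hk1 (by omega))
    · have : a = n + 1 := by omega
      rw [this]

-- B's loop stops immediately when the predicate holds
theorem pvLoopB_stop (neededApples : Int) (m : Nat) (h : pvOK neededApples m) :
    pvLoopB neededApples m = 8 * (m : Int) := by
  rw [pvLoopB]
  have : ¬ 2 * (m : Int) * ((m : Int) + 1) * (2 * (m : Int) + 1) < neededApples := by
    unfold pvOK at h; nlinarith
  simp [this]

-- the binary-search invariant: A's loop lands on B's answer
theorem pvLoopA_loopB (neededApples : Int) : ∀ (n : Nat) (l r : Int),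
    (r + 1 - l).toNat ≤ n →
    0 ≤ l → l ≤ r + 1 →
    (∀ k : Int, 0 ≤ k → k < l → ¬ pvOK neededApples k) →
    pvOK neededApples (r + 1) →
    8 * pvLoopA neededApples l r = pvLoopB neededApples l.toNat := by
  intro n
  induction n with
  | zero =>
    intro l r hn hl hlr hbelow habove
    have hrl : r + 1 = l := by omega
    rw [pvLoopA]
    have : ¬ l ≤ r := by omega
    simp only [this, dite_false]
    rw [pvLoopB_stop neededApples l.toNat (by rw [Int.toNat_of_nonneg hl]; rw [hrl] at habove; exact habove)]
    rw [Int.toNat_of_nonneg hl]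
  | succ n ih =>
    intro l r hn hl hlr hbelow habove
    rw [pvLoopA]
    by_cases hle : l ≤ r
    · simp only [hle, dite_true]
      set m := PySem.Int.floordiv (l + r) 2 with hm
      have hmid := PySem.Int.floordiv_two_mid_bounds (lo := l) (hi := r) hle
      by_cases hok : (2 * m + 1) * m * (m + 1) * 2 ≥ neededApples
      · simp only [hok, ite_true]
        exact ih l (m - 1) (by omega) hl (by omega) hbelow
          (by simpa using (show pvOK neededApples m from hok))
      · simp only [hok, ite_false]
        have hmfail : ¬ pvOK neededApples m := hok
        have hbelow' : ∀ k : Int, 0 ≤ k → k < m + 1 → ¬ pvOK neededApples k := by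
          intro k hk hkm hOK
          by_cases h1 : k < l
          · exact hbelow k hk h1 hOK
          · exact hmfail (pvOK_mono neededApples k m hk (by omega) hOK)
        have h1 := ih (m + 1) r (by omega) (by omega) (by omega) hbelow' habove
        rw [h1]
        exact (pvLoopB_skip neededApples l.toNat (m + 1).toNat (by omega)
          (fun k hk1 hk2 => hbelow' (k : Int) (Int.natCast_nonneg k) (by omega))).symm
    · simp only [hle, dite_false]
      have hrl : l = r + 1 := by omega
      rw [pvLoopB_stop neededApples l.toNat (by rw [Int.toNat_of_nonneg hl, hrl]; exact habove)]
      rw [Int.toNat_of_nonneg hl]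

-- ===== VERDICT (by name: the statement is the Claim_ definition above) =====
theorem minimumPerimeter_2_spec : Claim_equal_minimumPerimeter_2 := by
  intro neededApples hdom
  unfold Spec_minimumPerimeter_2 minimumPerimeter_2 minimumPerimeter_2_alt
  have hd : neededApples ≤ 2147483648 := by
    unfold Dom_minimumPerimeter_2 pvDomInt at hdom
    simpa using (of_decide_eq_true hdom).2
  have habove : pvOK neededApples (100000 + 1) := by
    unfold pvOK; nlinarith
  have := pvLoopA_loopB neededApples 100001 0 100000 (by norm_num) (by norm_num)
    (by norm_num) (by intro k hk hk0; omega) habove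
  simpa using this
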